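-- pv_equiv track=rewrite | github.com/CyrusSE/CTF-Writeups | CCP/Warmup/manipulasi.py | solve
-- ===== SOURCE A (Python) =====
-- def solve(N):
--     digits = list(str(N))
--     sorted_digits = sorted(digits, reverse=True)
--     smallest_even = None
--     for d in sorted_digits:
--         if int(d) % 2 == 0:
--             smallest_even = d
--     if smallest_even is None:
--         return "Mustahil! o_o"
--     result = sorted_digits[:]
--     result.remove(smallest_even)
--     result.append(smallest_even)
--     return "".join(result)
-- ===== SOURCE B (Python) =====
-- def solve(N):
--     counts = [0] * 10
--     for d in str(N):
--         counts[int(d)] += 1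
--     small = None
--     for v in (0, 2, 4, 6, 8):
--         if counts[v] > 0:
--             small = v
--             break
--     if small is None:
--         return "Mustahil! o_o"
--     counts[small] -= 1
--     out = []
--     for v in range(9, -1, -1):
--         out.append(str(v) * counts[v])
--     out.append(str(small))
--     return "".join(out)
-- ===== Notes on version B (the rewrite author's own statement) =====
-- stated objective: alternative
-- what changed: Replaces the comparison sort plus list.remove/append with a counting sort: one pass over str(N) builds a per-digit count array, the smallest even digit is found by scanning the even digit values in increasing order, and the answer is rebuilt from the counts in descending digit order with that digit appended.
import Mathlib
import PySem

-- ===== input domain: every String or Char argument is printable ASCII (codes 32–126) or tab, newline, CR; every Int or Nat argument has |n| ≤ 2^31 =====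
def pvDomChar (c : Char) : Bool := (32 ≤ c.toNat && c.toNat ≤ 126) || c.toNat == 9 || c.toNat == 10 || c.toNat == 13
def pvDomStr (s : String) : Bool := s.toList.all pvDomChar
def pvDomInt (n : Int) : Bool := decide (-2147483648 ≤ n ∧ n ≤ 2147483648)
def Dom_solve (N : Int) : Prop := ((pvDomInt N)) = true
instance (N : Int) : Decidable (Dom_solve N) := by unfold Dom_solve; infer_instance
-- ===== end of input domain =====

-- B replaces A's comparison sort + remove/append with a counting sort over the ten digit values (alternative algorithm, same result).


-- ===== PORT A =====
-- int(d) for a one-character string d; exact (none = ValueError); under Pre_solve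
-- every character of str(N) is a digit, so the .getD 0 default is never reached.
def pyIntOfChar (d : Char) : Int := (PySem.Int.ofChars? [d]).getD 0

def solve (N : Int) : String :=
  let digits := (PySem.Int.toStr N).toList
  let sorted_digits := PySem.List.sorted digits (fun d => d) true
  let smallest_even := sorted_digits.foldl
    (fun acc d => if PySem.Int.mod (pyIntOfChar d) 2 = 0 then some d else acc)
    (none : Option Char)
  match smallest_even with
  | none => "Mustahil! o_o"
  | some e =>
    -- result.remove(e) cannot raise here since e was taken from the list; none is unreachable
    match PySem.List.remove? sorted_digits e with
    | none => ""
    | some r => String.ofList (r ++ [e])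

-- ===== PORT B =====
-- Python's s * n for a string s and int n (empty for n ≤ 0); exact.
def strMul (s : List Char) (n : Int) : List Char := (List.replicate n.toNat s).flatten

def solve_alt (N : Int) : String :=
  let counts := (PySem.Int.toStr N).toList.foldl
    (fun cs d =>
      let v := pyIntOfChar d
      cs.set v.toNat (cs.getD v.toNat 0 + 1))
    (List.replicate 10 (0 : Int))
  match ([0, 2, 4, 6, 8] : List Nat).find? (fun v => counts.getD v 0 > 0) with
  | none => "Mustahil! o_o"
  | some small =>
    let counts := counts.set small (counts.getD small 0 - 1)
    let out := (PySem.List.pyRange 9 (-1) (-1)).foldl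
      (fun acc v => acc ++ strMul (PySem.Int.toStr v).toList (counts.getD v.toNat 0)) []
    String.ofList (out ++ (PySem.Int.toStr (small : Int)).toList)

-- ===== PRECONDITION & SPEC =====
-- A raises ValueError on negative N (int('-') on the sign character); B raises there too.
def Pre_solve (N : Int) : Prop := 0 ≤ N

instance (N : Int) : Decidable (Pre_solve N) := by unfold Pre_solve; infer_instance
def pvWitness_solve : Int := 3524

def Spec_solve (N : Int) (out : String) : Prop := out = solve_alt N
instance (N : Int) (out : String) : Decidable (Spec_solve N out) := by unfold Spec_solve; infer_instance

-- ===== CLAIM (what is proved, stated in full; the proofs are below) =====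
def Claim_equal_solve : Prop := ∀ (N : Int), Dom_solve N → Pre_solve N → Spec_solve N (solve N)

-- ===== LEMMAS AND PROOFS =====

def DIGITS : List Char := ['0','1','2','3','4','5','6','7','8','9']

lemma mem_toDigitsCore (f : Nat) : ∀ (n : Nat) (acc : List Char) (c : Char),
    c ∈ Nat.toDigitsCore 10 f n acc → c ∈ acc ∨ c ∈ DIGITS := by
  induction f with
  | zero => intro n acc c h; exact Or.inl h
  | succ f ih =>
    intro n acc c h
    rw [Nat.toDigitsCore] at h
    have hd : Nat.digitChar (n % 10) ∈ DIGITS := by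
      have : n % 10 < 10 := Nat.mod_lt _ (by norm_num)
      interval_cases h : (n % 10) <;> decide
    split at h
    · rcases List.mem_cons.1 h with rfl | h
      · exact Or.inr hd
      · exact Or.inl h
    · rcases ih _ _ _ h with h' | h'
      · rcases List.mem_cons.1 h' with rfl | h'
        · exact Or.inr hd
        · exact Or.inl h'
      · exact Or.inr h'

lemma mem_digits {N : Int} (hN : 0 ≤ N) {c : Char}
    (h : c ∈ (PySem.Int.toStr N).toList) : c ∈ DIGITS := by
  rw [PySem.Int.toList_toStr] at h
  unfold PySem.Int.toChars at h
  rw [if_neg (not_lt.2 hN)] at h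
  rcases mem_toDigitsCore _ _ _ _ h with h' | h'
  · simp at h'
  · exact h'

def cntStep (cs : List Int) (d : Char) : List Int :=
  cs.set (pyIntOfChar d).toNat (cs.getD (pyIntOfChar d).toNat 0 + 1)

lemma digit_val (d : Char) (hd : d ∈ DIGITS) :
    ∃ j, j < 10 ∧ d = Nat.digitChar j ∧ pyIntOfChar d = (j : Int) := by
  fin_cases hd
  · exact ⟨0, by norm_num, by decide, by decide⟩
  · exact ⟨1, by norm_num, by decide, by decide⟩
  · exact ⟨2, by norm_num, by decide, by decide⟩
  · exact ⟨3, by norm_num, by decide, by decide⟩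
  · exact ⟨4, by norm_num, by decide, by decide⟩
  · exact ⟨5, by norm_num, by decide, by decide⟩
  · exact ⟨6, by norm_num, by decide, by decide⟩
  · exact ⟨7, by norm_num, by decide, by decide⟩
  · exact ⟨8, by norm_num, by decide, by decide⟩
  · exact ⟨9, by norm_num, by decide, by decide⟩

lemma digitChar_inj {j k : Nat} (hj : j < 10) (hk : k < 10) :
    Nat.digitChar j = Nat.digitChar k ↔ j = k := by
  interval_cases j <;> interval_cases k <;> simp <;> decide

lemma length_cntStep (cs : List Int) (d : Char) : (cntStep cs d).length = cs.length :=
  List.length_set ..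

lemma getD_cntStep (cs : List Int) (hlen : cs.length = 10) (d : Char) (hd : d ∈ DIGITS)
    (k : Nat) (hk : k < 10) :
    (cntStep cs d).getD k 0 = cs.getD k 0 + (if d = Nat.digitChar k then 1 else 0) := by
  obtain ⟨j, hj, rfl, hv⟩ := digit_val d hd
  unfold cntStep
  rw [hv]
  simp only [Int.toNat_natCast, List.getD_eq_getElem?_getD, List.getElem?_set, hlen]
  by_cases hjk : j = k
  · subst hjk; simp [hj]
  · simp [hjk, (digitChar_inj hj hk).not.2 hjk]

lemma length_foldl_cntStep (ds : List Char) : ∀ cs : List Int,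
    (ds.foldl cntStep cs).length = cs.length := by
  induction ds with
  | nil => intro cs; rfl
  | cons d ds ih => intro cs; rw [List.foldl_cons, ih, length_cntStep]

lemma getD_foldl_cntStep (ds : List Char) : ∀ cs : List Int, (∀ c ∈ ds, c ∈ DIGITS) →
    cs.length = 10 → ∀ k : Nat, k < 10 →
    (ds.foldl cntStep cs).getD k 0 = cs.getD k 0 + (ds.count (Nat.digitChar k) : Int) := by
  induction ds with
  | nil => intro cs _ _ k _; simp
  | cons d ds ih =>
    intro cs h hlen k hk
    rw [List.foldl_cons, ih _ (fun c hc => h c (List.mem_cons_of_mem _ hc))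
      (by rw [length_cntStep]; exact hlen) k hk,
      getD_cntStep cs hlen d (h d List.mem_cons_self) k hk, List.count_cons]
    by_cases hdk : d = Nat.digitChar k
    · simp [hdk]; ring
    · simp [hdk]

def blockList (f : Nat → Nat) : List Char :=
  List.replicate (f 9) '9' ++ List.replicate (f 8) '8' ++ List.replicate (f 7) '7' ++
  List.replicate (f 6) '6' ++ List.replicate (f 5) '5' ++ List.replicate (f 4) '4' ++
  List.replicate (f 3) '3' ++ List.replicate (f 2) '2' ++ List.replicate (f 1) '1' ++
  List.replicate (f 0) '0'

def blockAux (f : Nat → Nat) : List Nat → List Char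
  | [] => []
  | v :: vs => List.replicate (f v) (Nat.digitChar v) ++ blockAux f vs

lemma digitChar_le {j k : Nat} (hj : j < 10) (hk : k < 10) (h : j ≤ k) :
    Nat.digitChar j ≤ Nat.digitChar k := by
  interval_cases j <;> interval_cases k <;> decide

lemma mem_blockAux {f : Nat → Nat} {vs : List Nat} {c : Char} (h : c ∈ blockAux f vs) :
    ∃ v ∈ vs, c = Nat.digitChar v := by
  induction vs with
  | nil => cases h
  | cons v vs ih =>
    rcases List.mem_append.1 h with h' | h'
    · exact ⟨v, List.mem_cons_self, (List.mem_replicate.1 h').2⟩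
    · obtain ⟨w, hw, rfl⟩ := ih h'
      exact ⟨w, List.mem_cons_of_mem _ hw, rfl⟩

lemma pairwise_blockAux (f : Nat → Nat) (vs : List Nat) (hvs : vs.Pairwise (· > ·))
    (hlt : ∀ v ∈ vs, v < 10) : (blockAux f vs).Pairwise (fun a b : Char => b ≤ a) := by
  induction vs with
  | nil => exact List.Pairwise.nil
  | cons v vs ih =>
    rcases List.pairwise_cons.1 hvs with ⟨hgt, hvs'⟩
    refine List.pairwise_append.2 ⟨?_, ih hvs' (fun w hw => hlt w (List.mem_cons_of_mem _ hw)), ?_⟩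
    · exact List.pairwise_replicate.2 (Or.inr le_rfl)
    · intro a ha b hb
      obtain ⟨w, hw, rfl⟩ := mem_blockAux hb
      rw [(List.mem_replicate.1 ha).2]
      exact digitChar_le (hlt w (List.mem_cons_of_mem _ hw)) (hlt v List.mem_cons_self)
        (Nat.le_of_lt (hgt w hw))

lemma blocks_pairwise (f : Nat → Nat) :
    (blockList f).Pairwise (fun a b : Char => b ≤ a) := by
  have : blockList f = blockAux f [9, 8, 7, 6, 5, 4, 3, 2, 1, 0] := by
    simp only [blockList, blockAux, List.append_assoc, List.append_nil]
    norm_num [show Nat.digitChar 9 = '9' from rfl, show Nat.digitChar 8 = '8' from rfl,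
      show Nat.digitChar 7 = '7' from rfl, show Nat.digitChar 6 = '6' from rfl,
      show Nat.digitChar 5 = '5' from rfl, show Nat.digitChar 4 = '4' from rfl,
      show Nat.digitChar 3 = '3' from rfl, show Nat.digitChar 2 = '2' from rfl,
      show Nat.digitChar 1 = '1' from rfl, show Nat.digitChar 0 = '0' from rfl]
  rw [this]
  exact pairwise_blockAux f _ (by decide) (by decide)

lemma blocks_count (ds : List Char) (h : ∀ c ∈ ds, c ∈ DIGITS) (c : Char) :
    (blockList (fun v => ds.count (Nat.digitChar v))).count c = ds.count c := by
  by_cases hc : c ∈ DIGITS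
  · fin_cases hc <;>
      simp [blockList, List.count_append, List.count_replicate] <;> rfl
  · have h0 : ds.count c = 0 := List.count_eq_zero.2 (fun hm => hc (h c hm))
    simp only [DIGITS, List.mem_cons, List.not_mem_nil, or_false] at hc
    push Not at hc
    obtain ⟨n0, n1, n2, n3, n4, n5, n6, n7, n8, n9⟩ := hc
    simp [blockList, List.count_append, List.count_replicate, h0,
      Ne.symm n0, Ne.symm n1, Ne.symm n2, Ne.symm n3, Ne.symm n4,
      Ne.symm n5, Ne.symm n6, Ne.symm n7, Ne.symm n8, Ne.symm n9]

lemma sorted_eq_blocks (ds : List Char) (h : ∀ c ∈ ds, c ∈ DIGITS) :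
    PySem.List.sorted ds (fun d => d) true
      = blockList (fun v => ds.count (Nat.digitChar v)) := by
  have hperm : (PySem.List.sorted ds (fun d => d) true).Perm
      (blockList (fun v => ds.count (Nat.digitChar v))) :=
    (PySem.List.sorted_perm ds _ true).trans
      (List.perm_iff_count.2 (fun c => (blocks_count ds h c).symm))
  exact hperm.eq_of_pairwise
    (fun a b _ _ h1 h2 => le_antisymm h2 h1)
    (PySem.List.sorted_pairwise_rev ds _) (blocks_pairwise _)

def estep (acc : Option Char) (d : Char) : Option Char :=
  if PySem.Int.mod (pyIntOfChar d) 2 = 0 then some d else acc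

lemma estep_self (acc : Option Char) (c : Char) : estep (estep acc c) c = estep acc c := by
  unfold estep; split <;> simp_all

lemma foldl_estep_replicate (c : Char) (m : Nat) : ∀ acc,
    (List.replicate m c).foldl estep acc = if m = 0 then acc else estep acc c := by
  induction m with
  | zero => simp
  | succ m ih =>
    intro acc
    rw [List.replicate_succ, List.foldl_cons, ih]
    by_cases hm : m = 0 <;> simp [hm, estep_self]

lemma estep1 (acc : Option Char) : estep acc '1' = acc := by unfold estep; rw [if_neg (by decide)]
lemma estep3 (acc : Option Char) : estep acc '3' = acc := by unfold estep; rw [if_neg (by decide)]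
lemma estep5 (acc : Option Char) : estep acc '5' = acc := by unfold estep; rw [if_neg (by decide)]
lemma estep7 (acc : Option Char) : estep acc '7' = acc := by unfold estep; rw [if_neg (by decide)]
lemma estep9 (acc : Option Char) : estep acc '9' = acc := by unfold estep; rw [if_neg (by decide)]
lemma estep0 (acc : Option Char) : estep acc '0' = some '0' := by unfold estep; rw [if_pos (by decide)]
lemma estep2 (acc : Option Char) : estep acc '2' = some '2' := by unfold estep; rw [if_pos (by decide)]
lemma estep4 (acc : Option Char) : estep acc '4' = some '4' := by unfold estep; rw [if_pos (by decide)]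
lemma estep6 (acc : Option Char) : estep acc '6' = some '6' := by unfold estep; rw [if_pos (by decide)]
lemma estep8 (acc : Option Char) : estep acc '8' = some '8' := by unfold estep; rw [if_pos (by decide)]

lemma dc0 : Nat.digitChar 0 = '0' := rfl
lemma dc1 : Nat.digitChar 1 = '1' := rfl
lemma dc2 : Nat.digitChar 2 = '2' := rfl
lemma dc3 : Nat.digitChar 3 = '3' := rfl
lemma dc4 : Nat.digitChar 4 = '4' := rfl
lemma dc5 : Nat.digitChar 5 = '5' := rfl
lemma dc6 : Nat.digitChar 6 = '6' := rfl
lemma dc7 : Nat.digitChar 7 = '7' := rfl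
lemma dc8 : Nat.digitChar 8 = '8' := rfl
lemma dc9 : Nat.digitChar 9 = '9' := rfl

lemma count_blockList (f : Nat → Nat) (k : Nat) (hk : k < 10) :
    (blockList f).count (Nat.digitChar k) = f k := by
  interval_cases k <;> simp [blockList, List.count_append, List.count_replicate, dc0, dc1, dc2, dc3, dc4, dc5, dc6, dc7, dc8, dc9]

lemma erase_blockList (f : Nat → Nat) (k : Nat) (hk : k < 10) (hfk : f k ≠ 0) :
    (blockList f).erase (Nat.digitChar k)
      = blockList (fun v => if v = k then f v - 1 else f v) := by
  interval_cases k <;>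
    simp [blockList, List.erase_append, List.mem_replicate, hfk,
      dc0, dc1, dc2, dc3, dc4, dc5, dc6, dc7, dc8, dc9]

lemma flatten_rep (m : Nat) (c : Char) : (List.replicate m [c]).flatten = List.replicate m c := by
  induction m with
  | zero => rfl
  | succ m ih => simp [List.replicate_succ, ih]

lemma strMul_digit (m : Nat) (c : Char) : strMul [c] (m : Int) = List.replicate m c := by
  unfold strMul; rw [Int.toNat_natCast, flatten_rep]

lemma out_fold (cs : List Int) (g : Nat → Nat) (hg : ∀ v, v < 10 → cs.getD v 0 = (g v : Int)) :
    (PySem.List.pyRange 9 (-1) (-1)).foldl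
      (fun acc v => acc ++ strMul (PySem.Int.toStr v).toList (cs.getD v.toNat 0)) []
      = blockList g := by
  have hr : PySem.List.pyRange 9 (-1) (-1) = [9, 8, 7, 6, 5, 4, 3, 2, 1, 0] := by decide
  rw [hr]
  simp only [List.foldl_cons, List.foldl_nil,
    show Int.toNat 9 = 9 from rfl, show Int.toNat 8 = 8 from rfl, show Int.toNat 7 = 7 from rfl,
    show Int.toNat 6 = 6 from rfl, show Int.toNat 5 = 5 from rfl, show Int.toNat 4 = 4 from rfl,
    show Int.toNat 3 = 3 from rfl, show Int.toNat 2 = 2 from rfl, show Int.toNat 1 = 1 from rfl,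
    show Int.toNat 0 = 0 from rfl]
  rw [hg 0 (by norm_num), hg 1 (by norm_num), hg 2 (by norm_num), hg 3 (by norm_num),
    hg 4 (by norm_num), hg 5 (by norm_num), hg 6 (by norm_num), hg 7 (by norm_num),
    hg 8 (by norm_num), hg 9 (by norm_num)]
  simp only [show (PySem.Int.toStr 9).toList = ['9'] from rfl, show (PySem.Int.toStr 8).toList = ['8'] from rfl,
    show (PySem.Int.toStr 7).toList = ['7'] from rfl, show (PySem.Int.toStr 6).toList = ['6'] from rfl,
    show (PySem.Int.toStr 5).toList = ['5'] from rfl, show (PySem.Int.toStr 4).toList = ['4'] from rfl,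
    show (PySem.Int.toStr 3).toList = ['3'] from rfl, show (PySem.Int.toStr 2).toList = ['2'] from rfl,
    show (PySem.Int.toStr 1).toList = ['1'] from rfl, show (PySem.Int.toStr 0).toList = ['0'] from rfl,
    strMul_digit]
  simp [blockList]

lemma main (ds : List Char) (hdig : ∀ c ∈ ds, c ∈ DIGITS) :
    (match (PySem.List.sorted ds (fun d => d) true).foldl estep none with
     | none => "Mustahil! o_o"
     | some e =>
       match PySem.List.remove? (PySem.List.sorted ds (fun d => d) true) e with
       | none => ""
       | some r => String.ofList (r ++ [e]))
    = (match ([0, 2, 4, 6, 8] : List Nat).find?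
          (fun v => decide ((ds.foldl cntStep (List.replicate 10 (0:Int))).getD v 0 > 0)) with
       | none => "Mustahil! o_o"
       | some small =>
         String.ofList
           ((PySem.List.pyRange 9 (-1) (-1)).foldl
             (fun acc v => acc ++ strMul (PySem.Int.toStr v).toList
               (((ds.foldl cntStep (List.replicate 10 (0:Int))).set small
                 ((ds.foldl cntStep (List.replicate 10 (0:Int))).getD small 0 - 1)).getD v.toNat 0)) []
            ++ (PySem.Int.toStr (small : Int)).toList)) := by
  rw [sorted_eq_blocks ds hdig]
  set cs := ds.foldl cntStep (List.replicate 10 (0:Int)) with hcs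
  set f : Nat → Nat := fun v => ds.count (Nat.digitChar v) with hf
  have hlen : cs.length = 10 := by rw [hcs, length_foldl_cntStep]; rfl
  have hcnt : ∀ k : Nat, k < 10 → cs.getD k 0 = ((f k : Nat) : Int) := by
    intro k hk
    rw [hcs, getD_foldl_cntStep ds _ hdig rfl k hk, hf]
    interval_cases k <;> simp
  have upd_getD : ∀ k : Nat, k < 10 → f k ≠ 0 → ∀ v : Nat, v < 10 →
      (cs.set k (cs.getD k 0 - 1)).getD v 0
      = ((if v = k then f v - 1 else f v : Nat) : Int) := by
    intro k hk hfk v hv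
    by_cases hvk : v = k
    · subst hvk
      rw [List.getD_eq_getElem?_getD, List.getElem?_set, if_pos rfl, if_pos (by omega),
        hcnt v hv, if_pos rfl]
      have hnz : f v ≠ 0 := hfk
      simp only [Option.getD_some]
      omega
    · rw [List.getD_eq_getElem?_getD, List.getElem?_set, if_neg (Ne.symm hvk),
        ← List.getD_eq_getElem?_getD, hcnt v hv, if_neg hvk]
  have d0 : ∀ h : f 0 = 0, decide (cs.getD 0 0 > 0) = false := fun h => by
    rw [hcnt 0 (by norm_num)]; simp [h]
  have d2 : ∀ h : f 2 = 0, decide (cs.getD 2 0 > 0) = false := fun h => by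
    rw [hcnt 2 (by norm_num)]; simp [h]
  have d4 : ∀ h : f 4 = 0, decide (cs.getD 4 0 > 0) = false := fun h => by
    rw [hcnt 4 (by norm_num)]; simp [h]
  have d6 : ∀ h : f 6 = 0, decide (cs.getD 6 0 > 0) = false := fun h => by
    rw [hcnt 6 (by norm_num)]; simp [h]
  have d8 : ∀ h : f 8 = 0, decide (cs.getD 8 0 > 0) = false := fun h => by
    rw [hcnt 8 (by norm_num)]; simp [h]
  have t0 : ∀ h : f 0 ≠ 0, decide (cs.getD 0 0 > 0) = true := fun h => by
    rw [hcnt 0 (by norm_num)]; simpa using Nat.pos_of_ne_zero h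
  have t2 : ∀ h : f 2 ≠ 0, decide (cs.getD 2 0 > 0) = true := fun h => by
    rw [hcnt 2 (by norm_num)]; simpa using Nat.pos_of_ne_zero h
  have t4 : ∀ h : f 4 ≠ 0, decide (cs.getD 4 0 > 0) = true := fun h => by
    rw [hcnt 4 (by norm_num)]; simpa using Nat.pos_of_ne_zero h
  have t6 : ∀ h : f 6 ≠ 0, decide (cs.getD 6 0 > 0) = true := fun h => by
    rw [hcnt 6 (by norm_num)]; simpa using Nat.pos_of_ne_zero h
  have t8 : ∀ h : f 8 ≠ 0, decide (cs.getD 8 0 > 0) = true := fun h => by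
    rw [hcnt 8 (by norm_num)]; simpa using Nat.pos_of_ne_zero h
  by_cases h0 : f 0 = 0
  swap
  · -- smallest even digit is 0
    have hse : (blockList f).foldl estep none = some (Nat.digitChar 0) := by
      simp [blockList, List.foldl_append, foldl_estep_replicate,
        estep0, estep1, estep2, estep3, estep4, estep5, estep6, estep7, estep8, estep9,
        h0, dc0]
    have hfind : (([0, 2, 4, 6, 8] : List Nat).find? (fun v => decide (cs.getD v 0 > 0)))
        = some 0 := by
      simp only [List.find?]
      rw [t0 h0]
    have hmem : Nat.digitChar 0 ∈ blockList f :=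
      List.count_pos_iff.1 (by rw [count_blockList f 0 (by norm_num)]; exact Nat.pos_of_ne_zero h0)
    have hrm : PySem.List.remove? (blockList f) (Nat.digitChar 0)
        = some (blockList (fun v => if v = 0 then f v - 1 else f v)) := by
      rw [PySem.List.remove?_eq_some_erase (blockList f) _ hmem,
        erase_blockList f 0 (by norm_num) h0]
    have hout : (PySem.List.pyRange 9 (-1) (-1)).foldl
        (fun acc v => acc ++ strMul (PySem.Int.toStr v).toList
          ((cs.set 0 (cs.getD 0 0 - 1)).getD v.toNat 0)) []
        = blockList (fun v => if v = 0 then f v - 1 else f v) :=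
      out_fold _ _ (upd_getD 0 (by norm_num) h0)
    rw [hse, hfind]
    simp only [hrm, hout]
    simp [dc0]
    decide
  by_cases h2 : f 2 = 0
  swap
  · -- smallest even digit is 2
    have hse : (blockList f).foldl estep none = some (Nat.digitChar 2) := by
      simp [blockList, List.foldl_append, foldl_estep_replicate,
        estep1, estep2, estep3, estep4, estep5, estep6, estep7, estep8, estep9,
        h0, h2, dc2]
    have hfind : (([0, 2, 4, 6, 8] : List Nat).find? (fun v => decide (cs.getD v 0 > 0)))
        = some 2 := by
      simp only [List.find?]
      rw [d0 h0, t2 h2]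
    have hmem : Nat.digitChar 2 ∈ blockList f :=
      List.count_pos_iff.1 (by rw [count_blockList f 2 (by norm_num)]; exact Nat.pos_of_ne_zero h2)
    have hrm : PySem.List.remove? (blockList f) (Nat.digitChar 2)
        = some (blockList (fun v => if v = 2 then f v - 1 else f v)) := by
      rw [PySem.List.remove?_eq_some_erase (blockList f) _ hmem,
        erase_blockList f 2 (by norm_num) h2]
    have hout : (PySem.List.pyRange 9 (-1) (-1)).foldl
        (fun acc v => acc ++ strMul (PySem.Int.toStr v).toList
          ((cs.set 2 (cs.getD 2 0 - 1)).getD v.toNat 0)) []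
        = blockList (fun v => if v = 2 then f v - 1 else f v) :=
      out_fold _ _ (upd_getD 2 (by norm_num) h2)
    rw [hse, hfind]
    simp only [hrm, hout]
    simp [dc2]
    decide
  by_cases h4 : f 4 = 0
  swap
  · -- smallest even digit is 4
    have hse : (blockList f).foldl estep none = some (Nat.digitChar 4) := by
      simp [blockList, List.foldl_append, foldl_estep_replicate,
        estep1, estep3, estep4, estep5, estep6, estep7, estep8, estep9,
        h0, h2, h4, dc4]
    have hfind : (([0, 2, 4, 6, 8] : List Nat).find? (fun v => decide (cs.getD v 0 > 0)))
        = some 4 := by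
      simp only [List.find?]
      rw [d0 h0, d2 h2, t4 h4]
    have hmem : Nat.digitChar 4 ∈ blockList f :=
      List.count_pos_iff.1 (by rw [count_blockList f 4 (by norm_num)]; exact Nat.pos_of_ne_zero h4)
    have hrm : PySem.List.remove? (blockList f) (Nat.digitChar 4)
        = some (blockList (fun v => if v = 4 then f v - 1 else f v)) := by
      rw [PySem.List.remove?_eq_some_erase (blockList f) _ hmem,
        erase_blockList f 4 (by norm_num) h4]
    have hout : (PySem.List.pyRange 9 (-1) (-1)).foldl
        (fun acc v => acc ++ strMul (PySem.Int.toStr v).toList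
          ((cs.set 4 (cs.getD 4 0 - 1)).getD v.toNat 0)) []
        = blockList (fun v => if v = 4 then f v - 1 else f v) :=
      out_fold _ _ (upd_getD 4 (by norm_num) h4)
    rw [hse, hfind]
    simp only [hrm, hout]
    simp [dc4]
    decide
  by_cases h6 : f 6 = 0
  swap
  · -- smallest even digit is 6
    have hse : (blockList f).foldl estep none = some (Nat.digitChar 6) := by
      simp [blockList, List.foldl_append, foldl_estep_replicate,
        estep1, estep3, estep5, estep6, estep7, estep8, estep9,
        h0, h2, h4, h6, dc6]
    have hfind : (([0, 2, 4, 6, 8] : List Nat).find? (fun v => decide (cs.getD v 0 > 0)))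
        = some 6 := by
      simp only [List.find?]
      rw [d0 h0, d2 h2, d4 h4, t6 h6]
    have hmem : Nat.digitChar 6 ∈ blockList f :=
      List.count_pos_iff.1 (by rw [count_blockList f 6 (by norm_num)]; exact Nat.pos_of_ne_zero h6)
    have hrm : PySem.List.remove? (blockList f) (Nat.digitChar 6)
        = some (blockList (fun v => if v = 6 then f v - 1 else f v)) := by
      rw [PySem.List.remove?_eq_some_erase (blockList f) _ hmem,
        erase_blockList f 6 (by norm_num) h6]
    have hout : (PySem.List.pyRange 9 (-1) (-1)).foldl
        (fun acc v => acc ++ strMul (PySem.Int.toStr v).toList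
          ((cs.set 6 (cs.getD 6 0 - 1)).getD v.toNat 0)) []
        = blockList (fun v => if v = 6 then f v - 1 else f v) :=
      out_fold _ _ (upd_getD 6 (by norm_num) h6)
    rw [hse, hfind]
    simp only [hrm, hout]
    simp [dc6]
    decide
  by_cases h8 : f 8 = 0
  swap
  · -- smallest even digit is 8
    have hse : (blockList f).foldl estep none = some (Nat.digitChar 8) := by
      simp [blockList, List.foldl_append, foldl_estep_replicate,
        estep1, estep3, estep5, estep7, estep8, estep9,
        h0, h2, h4, h6, h8, dc8]
    have hfind : (([0, 2, 4, 6, 8] : List Nat).find? (fun v => decide (cs.getD v 0 > 0)))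
        = some 8 := by
      simp only [List.find?]
      rw [d0 h0, d2 h2, d4 h4, d6 h6, t8 h8]
    have hmem : Nat.digitChar 8 ∈ blockList f :=
      List.count_pos_iff.1 (by rw [count_blockList f 8 (by norm_num)]; exact Nat.pos_of_ne_zero h8)
    have hrm : PySem.List.remove? (blockList f) (Nat.digitChar 8)
        = some (blockList (fun v => if v = 8 then f v - 1 else f v)) := by
      rw [PySem.List.remove?_eq_some_erase (blockList f) _ hmem,
        erase_blockList f 8 (by norm_num) h8]
    have hout : (PySem.List.pyRange 9 (-1) (-1)).foldl
        (fun acc v => acc ++ strMul (PySem.Int.toStr v).toList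
          ((cs.set 8 (cs.getD 8 0 - 1)).getD v.toNat 0)) []
        = blockList (fun v => if v = 8 then f v - 1 else f v) :=
      out_fold _ _ (upd_getD 8 (by norm_num) h8)
    rw [hse, hfind]
    simp only [hrm, hout]
    simp [dc8]
    decide
  -- no even digit at all
  have hse : (blockList f).foldl estep none = none := by
    simp [blockList, List.foldl_append, foldl_estep_replicate,
      estep1, estep3, estep5, estep7, estep9,
      h0, h2, h4, h6, h8]
  have hfind : (([0, 2, 4, 6, 8] : List Nat).find? (fun v => decide (cs.getD v 0 > 0)))
      = none := by
    simp only [List.find?]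
    rw [d0 h0, d2 h2, d4 h4, d6 h6, d8 h8]
  rw [hse, hfind]

-- ===== VERDICT (by name: the statement is the Claim_ definition above) =====
theorem solve_spec : Claim_equal_solve := by
  intro N _ hN
  unfold Spec_solve
  exact main (PySem.Int.toStr N).toList (fun c hc => mem_digits hN hc)
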